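-- pv_equiv track=rewrite | github.com/mohammadfaiizan/ProjectI | DSA/Problem/Graph/01_Graph_Fundamentals_Representations/1319_Number_of_Operations_to_Make_Network_Connected.py | makeConnected_approach4_mathematical_analysis
-- ===== SOURCE A (Python) =====
-- from typing import List
--
-- def makeConnected_approach4_mathematical_analysis(n: int, connections: List[List[int]]) -> int:
--     """
--     Approach 4: Mathematical approach with detailed analysis
--
--     Analyze the problem from graph theory perspective.
--
--     Time: O(E * α(N))
--     Space: O(N)
--     """
--     total_edges = len(connections)
--
--     # Minimum edges needed for connected graph
--     min_edges_needed = n - 1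
--
--     if total_edges < min_edges_needed:
--         return -1
--
--     # Use Union-Find to find actual structure
--     parent = list(range(n))
--
--     def find(x):
--         if parent[x] != x:
--             parent[x] = find(parent[x])
--         return parent[x]
--
--     def union(x, y):
--         px, py = find(x), find(y)
--         if px != py:
--             parent[py] = px
--             return True
--         return False
--
--     # Process connections and count redundant edges
--     redundant_edges = 0
--     for a, b in connections:
--         if not union(a, b):
--             redundant_edges += 1
--
--     # Count connected components
--     components = len(set(find(i) for i in range(n)))
--
--     # Verify we have enough redundant edges to connect components
--     operations_needed = components - 1
--
--     return operations_needed
-- ===== SOURCE B (Python) =====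
-- from typing import List
--
-- def makeConnected_approach4_mathematical_analysis(n: int, connections: List[List[int]]) -> int:
--     # Count components by label merging: every node carries a component label,
--     # and each edge merges one label into the other; answer = #labels - 1.
--     if len(connections) < n - 1:
--         return -1
--     comp = list(range(n))
--     for a, b in connections:
--         ca, cb = comp[a], comp[b]
--         if ca != cb:
--             comp = [ca if c == cb else c for c in comp]
--     return len(set(comp)) - 1
-- ===== Notes on version B (the rewrite author's own statement) =====
-- stated objective: simpler
-- what changed: Replaces the union-find parent forest (recursive find with path compression, union, redundant-edge counter, final root-set pass) by a flat component-label array: each edge merges one label into the other by a single relabeling pass, and the answer is the number of distinct labels minus 1.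
import Mathlib
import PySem

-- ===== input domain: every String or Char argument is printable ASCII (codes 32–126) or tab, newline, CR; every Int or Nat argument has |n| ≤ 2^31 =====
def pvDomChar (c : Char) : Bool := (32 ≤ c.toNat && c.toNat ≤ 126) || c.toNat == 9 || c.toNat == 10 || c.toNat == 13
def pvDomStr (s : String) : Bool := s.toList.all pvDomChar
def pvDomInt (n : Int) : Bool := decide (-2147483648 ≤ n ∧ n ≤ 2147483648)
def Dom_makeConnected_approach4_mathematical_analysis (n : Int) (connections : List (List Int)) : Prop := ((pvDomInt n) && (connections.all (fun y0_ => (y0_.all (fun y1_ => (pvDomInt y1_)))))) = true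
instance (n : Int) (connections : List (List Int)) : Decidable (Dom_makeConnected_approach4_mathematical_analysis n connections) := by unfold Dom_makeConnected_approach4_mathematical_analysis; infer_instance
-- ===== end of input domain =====

-- B replaces A's union-find (recursive find with path compression, union, redundant-edge
-- counter, final root-set pass) by a flat component-label array merged edge by edge;
-- objective: simpler. Equivalence is about the return value (A mutates only local state).

-- ===== PORT A =====
-- find(x): path-compressing root lookup. The Nat fuel only makes the Python recursion
-- structural: inside Pre_ the parent forest is acyclic and fuel length+1 is never exhausted
-- (proved below); pyGet?/pySetD are exact (including negative-index wraparound).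
def pvFindA : Nat → List Int → Int → List Int × Int
  | 0, p, x => (p, x)
  | fuel+1, p, x =>
    match PySem.List.pyGet? p x with
    | none => (p, x)
    | some px =>
      if px ≠ x then
        match pvFindA fuel p px with
        | (p1, r) => (PySem.List.pySetD p1 x r, r)
      else (p, x)

def pvUnionA (fuel : Nat) (p : List Int) (x y : Int) : List Int × Bool :=
  match pvFindA fuel p x with
  | (p1, px) =>
    match pvFindA fuel p1 y with
    | (p2, py) => if px ≠ py then (PySem.List.pySetD p2 py px, true) else (p2, false)


-- ===== PORT A (entry point) =====
def makeConnected_approach4_mathematical_analysis (n : Int) (connections : List (List Int)) : Int :=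
  let totalEdges : Int := connections.length
  let minEdgesNeeded := n - 1
  if totalEdges < minEdgesNeeded then -1
  else
    let parent0 := PySem.List.pyRange 0 n 1
    let fuel := parent0.length + 1
    let st := connections.foldl (fun (st : List Int × Int) e =>
      match e with
      | [a, b] =>
        match pvUnionA fuel st.1 a b with
        | (p, ok) => (p, if ok then st.2 else st.2 + 1)
      | _ => st) (parent0, 0)
    let fin := (PySem.List.pyRange 0 n 1).foldl
      (fun (st : List Int × List Int) i =>
        match pvFindA fuel st.1 i with
        | (p, r) => (p, st.2 ++ [r])) (st.1, ([] : List Int))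
    ((PySem.Set.ofList fin.2).length : Int) - 1

-- ===== PORT B =====
def makeConnected_approach4_mathematical_analysis_alt (n : Int) (connections : List (List Int)) : Int :=
  if (connections.length : Int) < n - 1 then -1
  else
    let comp := connections.foldl (fun (comp : List Int) e =>
      match e with
      | [] => comp
      | [_] => comp
      | a :: b :: rest =>
        if rest.isEmpty then
          let ca := PySem.List.pyGetD comp a 0
          let cb := PySem.List.pyGetD comp b 0
          if ca ≠ cb then comp.map (fun c => if c = cb then ca else c) else comp
        else comp) (PySem.List.pyRange 0 n 1)
    ((PySem.Set.ofList comp).length : Int) - 1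


-- ===== PRECONDITION & SPEC =====
-- Pre_ admits every input on which the early guard len(connections) < n-1 returns -1, and
-- otherwise connections whose entries are pairs of node ids in [-n, n) (Python's negative
-- list indexing makes ids in [-n, 0) aliases of id+n, and both programs return there).
-- Excluded are only inputs where A raises: entries of length ≠ 2 (ValueError on unpacking)
-- and ids outside [-n, n) (IndexError).
def Pre_makeConnected_approach4_mathematical_analysis (n : Int) (connections : List (List Int)) : Prop :=
  ((connections.length : Int) < n - 1) ∨
    ∀ e ∈ connections, e.length = 2 ∧ ∀ v ∈ e, -n ≤ v ∧ v < n
instance (n : Int) (connections : List (List Int)) : Decidable (Pre_makeConnected_approach4_mathematical_analysis n connections) := by unfold Pre_makeConnected_approach4_mathematical_analysis; infer_instance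

def pvWitness_makeConnected_approach4_mathematical_analysis : Int × List (List Int) := (4, [[0, 1], [1, 2], [-2, 3], [1, -1]])

def Spec_makeConnected_approach4_mathematical_analysis (n : Int) (connections : List (List Int)) (out : Int) : Prop := out = makeConnected_approach4_mathematical_analysis_alt n connections
instance (n : Int) (connections : List (List Int)) (out : Int) : Decidable (Spec_makeConnected_approach4_mathematical_analysis n connections out) := by unfold Spec_makeConnected_approach4_mathematical_analysis; infer_instance

-- ===== CLAIM (what is proved, stated in full; the proofs are below) =====
def Claim_equal_makeConnected_approach4_mathematical_analysis : Prop := ∀ (n : Int) (connections : List (List Int)), Dom_makeConnected_approach4_mathematical_analysis n connections → Pre_makeConnected_approach4_mathematical_analysis n connections → Spec_makeConnected_approach4_mathematical_analysis n connections (makeConnected_approach4_mathematical_analysis n connections)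

-- ===== LEMMAS AND PROOFS =====
def pvRootF : Nat → List Int → Int → Int
  | 0, _, x => x
  | fuel+1, p, x =>
    match PySem.List.pyGet? p x with
    | none => x
    | some px => if px = x then x else pvRootF fuel p px

def pvRt (p : List Int) (x : Int) : Int := pvRootF (p.length + 1) p x

def pvNR (p : List Int) : Nat := (List.range p.length).countP (fun i => decide (p.getD i 0 ≠ (i : Int)))

def pvInR (p : List Int) (x : Int) : Prop := 0 ≤ x ∧ x.toNat < p.length

-- Python index normalisation: v < 0 means v + len
def pvNm (L : Nat) (x : Int) : Int := if x < 0 then x + L else x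

def pvCert (p : List Int) (d : Nat → Nat) : Prop :=
  ∀ i : Nat, i < p.length →
    0 ≤ p.getD i 0 ∧ (p.getD i 0).toNat < p.length ∧
    (p.getD i 0 = (i : Int) → d i = 0) ∧
    (p.getD i 0 ≠ (i : Int) → d (p.getD i 0).toNat < d i) ∧
    d i ≤ pvNR p

theorem pvGet_eq {p : List Int} {x : Int} (hx : pvInR p x) :
    PySem.List.pyGet? p x = some (p.getD x.toNat 0) := by
  rw [PySem.List.pyGet?_of_nonneg p hx.1, List.getElem?_eq_getElem hx.2,
    List.getD_eq_getElem _ _ hx.2]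

theorem pvGet_negI {p : List Int} {x : Int} (h1 : -(p.length:Int) ≤ x) (h2 : x < 0) :
    PySem.List.pyGet? p x = some (p.getD (x + p.length).toNat 0) := by
  simp only [PySem.List.pyGet?, PySem.List.pyIdx?, if_neg (not_le.mpr h2), if_pos h1, Option.bind]
  have h3 : p.length - (-x).toNat = (x + p.length).toNat := by omega
  rw [h3, List.getElem?_eq_getElem (by omega), List.getD_eq_getElem _ _ (by omega)]

theorem pvSet_negI {p : List Int} {x : Int} (v : Int) (h1 : -(p.length:Int) ≤ x) (h2 : x < 0) :
    PySem.List.pySetD p x v = p.set (x + p.length).toNat v := by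
  simp only [PySem.List.pySetD, PySem.List.pySet?, PySem.List.pyIdx?, if_neg (not_le.mpr h2),
    if_pos h1, Option.map, Option.getD]
  congr 1
  omega

theorem pvNR_le (p : List Int) : pvNR p ≤ p.length := by
  calc pvNR p ≤ (List.range p.length).length := List.countP_le_length
  _ = p.length := List.length_range

theorem pvCert_fuel {p : List Int} {d : Nat → Nat} (hc : pvCert p d) {i : Nat} (hi : i < p.length) :
    d i < p.length + 1 := by
  have := (hc i hi).2.2.2.2
  have := pvNR_le p
  omega

-- the certificate entry at a nonnegative Int index, with casts straightened out
theorem pvCert_at {p : List Int} {d : Nat → Nat} (hc : pvCert p d) {x : Int} (hx : pvInR p x) :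
    0 ≤ p.getD x.toNat 0 ∧ (p.getD x.toNat 0).toNat < p.length ∧
    (p.getD x.toNat 0 = x → d x.toNat = 0) ∧
    (p.getD x.toNat 0 ≠ x → d (p.getD x.toNat 0).toNat < d x.toNat) ∧
    d x.toNat ≤ pvNR p := by
  have h := hc x.toNat hx.2
  rwa [Int.toNat_of_nonneg hx.1] at h

theorem pvInR_step {p : List Int} {d : Nat → Nat} (hc : pvCert p d) {x : Int} (hx : pvInR p x) :
    pvInR p (p.getD x.toNat 0) :=
  ⟨(pvCert_at hc hx).1, (pvCert_at hc hx).2.1⟩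

theorem pvRootF_succ {p : List Int} {x : Int} (hx : pvInR p x) (fuel : Nat) :
    pvRootF (fuel+1) p x =
      if p.getD x.toNat 0 = x then x else pvRootF fuel p (p.getD x.toNat 0) := by
  simp only [pvRootF, pvGet_eq hx]

theorem pvRootF_congr {p : List Int} {d : Nat → Nat} (hc : pvCert p d) :
    ∀ (f1 : Nat) (x : Int) (f2 : Nat), pvInR p x → d x.toNat < f1 → d x.toNat < f2 →
      pvRootF f1 p x = pvRootF f2 p x := by
  intro f1
  induction f1 with
  | zero => intro x f2 hx h1 h2; omega
  | succ f1 ih =>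
    intro x f2 hx h1 h2
    obtain ⟨f2, rfl⟩ : ∃ k, f2 = k + 1 := ⟨f2 - 1, by omega⟩
    rw [pvRootF_succ hx, pvRootF_succ hx]
    by_cases hr : p.getD x.toNat 0 = x
    · rw [if_pos hr, if_pos hr]
    · rw [if_neg hr, if_neg hr]
      have hd := (pvCert_at hc hx).2.2.2.1 hr
      exact ih _ _ (pvInR_step hc hx) (by omega) (by omega)

theorem pvRt_root {p : List Int} {d : Nat → Nat} (_hc : pvCert p d) {x : Int} (hx : pvInR p x)
    (hr : p.getD x.toNat 0 = x) : pvRt p x = x := by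
  unfold pvRt
  rw [pvRootF_succ hx, if_pos hr]

theorem pvRt_step {p : List Int} {d : Nat → Nat} (hc : pvCert p d) {x : Int} (hx : pvInR p x)
    (hr : p.getD x.toNat 0 ≠ x) : pvRt p x = pvRt p (p.getD x.toNat 0) := by
  unfold pvRt
  have h1 : pvRootF (p.length + 1) p x = pvRootF p.length p (p.getD x.toNat 0) := by
    rw [pvRootF_succ hx, if_neg hr]
  rw [h1]
  have hd := (pvCert_at hc hx).2.2.2.1 hr
  have hfx := pvCert_fuel hc hx.2
  exact pvRootF_congr hc _ _ _ (pvInR_step hc hx) (by omega) (by omega)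

theorem pvRt_spec {p : List Int} {d : Nat → Nat} (hc : pvCert p d) {x : Int} (hx : pvInR p x) :
    pvInR p (pvRt p x) ∧ p.getD (pvRt p x).toNat 0 = pvRt p x ∧ d (pvRt p x).toNat = 0 := by
  obtain ⟨k, hk⟩ : ∃ k, d x.toNat ≤ k := ⟨d x.toNat, le_refl _⟩
  induction k generalizing x with
  | zero =>
    by_cases hr : p.getD x.toNat 0 = x
    · rw [pvRt_root hc hx hr]
      exact ⟨hx, hr, (pvCert_at hc hx).2.2.1 hr⟩
    · have := (pvCert_at hc hx).2.2.2.1 hr; omega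
  | succ k ih =>
    by_cases hr : p.getD x.toNat 0 = x
    · rw [pvRt_root hc hx hr]
      exact ⟨hx, hr, (pvCert_at hc hx).2.2.1 hr⟩
    · rw [pvRt_step hc hx hr]
      have hd := (pvCert_at hc hx).2.2.2.1 hr
      exact ih (pvInR_step hc hx) (by omega)

theorem pvNR_lt {p : List Int} {d : Nat → Nat} (hc : pvCert p d) (hL : 0 < p.length) :
    pvNR p < p.length := by
  have h0 : pvInR p 0 := ⟨le_refl 0, by simpa using hL⟩
  obtain ⟨hrtI, hrtroot, _⟩ := pvRt_spec hc h0
  have hne : pvNR p ≠ p.length := by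
    intro h
    unfold pvNR at h
    have h' : (List.range p.length).countP (fun i => decide (p.getD i 0 ≠ (i : Int))) =
        (List.range p.length).length := by rw [List.length_range]; exact h
    have hall := List.countP_eq_length.mp h' (pvRt p 0).toNat (List.mem_range.mpr hrtI.2)
    simp only [decide_eq_true_eq] at hall
    rw [hrtroot, Int.toNat_of_nonneg hrtI.1] at hall
    exact hall rfl
  have := pvNR_le p
  omega

theorem pvGetD_set_self {p : List Int} {a : Nat} (h : a < p.length) (v : Int) :
    (p.set a v).getD a 0 = v := by
  rw [List.getD_eq_getElem _ _ (by simpa using h)]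
  simp [List.getElem_set, h]

theorem pvGetD_set_ne {p : List Int} {a j : Nat} (hne : a ≠ j) (v : Int) :
    (p.set a v).getD j 0 = p.getD j 0 := by
  by_cases hj : j < p.length
  · rw [List.getD_eq_getElem _ _ (by simpa using hj), List.getD_eq_getElem _ _ hj]
    simp [List.getElem_set, hne]
  · rw [List.getD_eq_default _ _ (by simpa using hj), List.getD_eq_default _ _ (by omega)]

theorem pvCountP_flip {α : Type} (f g : α → Bool) (a : α) :
    ∀ (l : List α), l.Nodup → a ∈ l → f a = false → g a = true →
      (∀ b ∈ l, b ≠ a → f b = g b) → l.countP g = l.countP f + 1 := by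
  intro l
  induction l with
  | nil => intro _ h; simp at h
  | cons x l ih =>
    intro hnd hmem hfa hga hcong
    rcases List.mem_cons.mp hmem with rfl | hmem
    · have hrest : l.countP g = l.countP f := by
        apply List.countP_congr
        intro b hb
        have hbne : b ≠ a := fun h => (List.nodup_cons.mp hnd).1 (h ▸ hb)
        rw [hcong b (List.mem_cons_of_mem _ hb) hbne]
      simp [List.countP_cons, hfa, hga, hrest]
    · have hxa : x ≠ a := fun h => (List.nodup_cons.mp hnd).1 (h ▸ hmem)
      have := ih (List.nodup_cons.mp hnd).2 hmem hfa hga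
        (fun b hb hbne => hcong b (List.mem_cons_of_mem _ hb) hbne)
      simp only [List.countP_cons, this, hcong x List.mem_cons_self hxa]
      omega

-- toNat-injectivity on nonnegative ints
theorem pvToNat_ne {x y : Int} (hx : 0 ≤ x) (hy : 0 ≤ y) (h : x ≠ y) : x.toNat ≠ y.toNat := by
  omega

theorem pvCompress {p : List Int} {d : Nat → Nat} (hc : pvCert p d) {x : Int} (hx : pvInR p x)
    (hnr : p.getD x.toNat 0 ≠ x) :
    pvCert (p.set x.toNat (pvRt p x)) d ∧ pvNR (p.set x.toNat (pvRt p x)) = pvNR p ∧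
    (∀ y, pvInR p y → pvRt (p.set x.toNat (pvRt p x)) y = pvRt p y) := by
  obtain ⟨hrR, hrroot, hrd0⟩ := pvRt_spec hc hx
  set r := pvRt p x with hrdef
  have hdx : 0 < d x.toNat := by
    have := (pvCert_at hc hx).2.2.2.1 hnr
    omega
  have hrx : r ≠ x := by
    intro h
    rw [h] at hrd0
    omega
  have hrxN : r.toNat ≠ x.toNat := pvToNat_ne hrR.1 hx.1 hrx
  set q := p.set x.toNat r with hq
  have hlen : q.length = p.length := List.length_set ..
  -- entries of q
  have hgq : ∀ j : Nat, j ≠ x.toNat → q.getD j 0 = p.getD j 0 := fun j hj =>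
    pvGetD_set_ne (fun h => hj h.symm) r
  have hgqx : q.getD x.toNat 0 = r := pvGetD_set_self hx.2 r
  -- pvNR unchanged
  have hNR : pvNR q = pvNR p := by
    unfold pvNR
    rw [hlen]
    apply List.countP_congr
    intro j hj
    by_cases hjx : j = x.toNat
    · subst hjx
      simp only [ne_eq, hgqx, Int.toNat_of_nonneg hx.1]
      simp only [hrx, decide_not, List.getD_eq_getElem?_getD] at *
      simp [hnr]
    · rw [hgq j hjx]
  have hcq : pvCert q d := by
    intro i hi
    rw [hlen] at hi
    by_cases hix : i = x.toNat
    · subst hix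
      simp only [hlen, hNR, hgqx]
      refine ⟨hrR.1, hrR.2, ?_, ?_, (pvCert_at hc hx).2.2.2.2⟩
      · intro h
        exact absurd (by rw [h, Int.toNat_of_nonneg hx.1]) hrx
      · intro _
        rw [hrd0]
        exact hdx
    · simp only [hlen, hNR, hgq i hix]
      exact hc i hi
  have hInRq : ∀ z, pvInR p z → pvInR q z := by
    intro z hz
    exact ⟨hz.1, by rw [hlen]; exact hz.2⟩
  refine ⟨hcq, hNR, ?_⟩
  intro y hy
  obtain ⟨k, hk⟩ : ∃ k, d y.toNat ≤ k := ⟨_, le_refl _⟩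
  induction k generalizing y with
  | zero =>
    by_cases hr' : p.getD y.toNat 0 = y
    · have hyx : y.toNat ≠ x.toNat := by
        intro h
        have hyxI : y = x := by have := hy.1; have := hx.1; omega
        rw [hyxI] at hr'
        exact hnr hr'
      rw [pvRt_root hcq (hInRq y hy) (by rw [hgq _ hyx]; exact hr'), pvRt_root hc hy hr']
    · have := (pvCert_at hc hy).2.2.2.1 hr'
      omega
  | succ k ih =>
    by_cases hr' : p.getD y.toNat 0 = y
    · have hyx : y.toNat ≠ x.toNat := by
        intro h
        have hyxI : y = x := by have := hy.1; have := hx.1; omega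
        rw [hyxI] at hr'
        exact hnr hr'
      rw [pvRt_root hcq (hInRq y hy) (by rw [hgq _ hyx]; exact hr'), pvRt_root hc hy hr']
    · by_cases hyx : y.toNat = x.toNat
      · have hyxI : y = x := by have := hy.1; have := hx.1; omega
        subst hyxI
        rw [pvRt_step hcq (hInRq y hx) (by rw [hgqx]; exact hrx), hgqx, ← hrdef]
        rw [pvRt_root hcq (hInRq _ hrR) (by rw [hgq _ hrxN]; exact hrroot)]
      · rw [pvRt_step hcq (hInRq y hy) (by rw [hgq _ hyx]; exact hr'), pvRt_step hc hy hr',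
          hgq _ hyx]
        exact ih _ (pvInR_step hc hy) (by have := (pvCert_at hc hy).2.2.2.1 hr'; omega)



theorem pvLink {p : List Int} {d : Nat → Nat} (hc : pvCert p d) {rx ry : Int}
    (hrxR : pvInR p rx) (hryR : pvInR p ry)
    (hrootx : p.getD rx.toNat 0 = rx) (hrooty : p.getD ry.toNat 0 = ry)
    (hne : rx ≠ ry) :
    pvCert (p.set ry.toNat rx) (fun i => if pvRt p (i : Int) = ry then d i + 1 else d i) ∧
    (∀ z, pvInR p z → pvRt (p.set ry.toNat rx) z = if pvRt p z = ry then rx else pvRt p z) := by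
  have hdx0 : d rx.toNat = 0 := (pvCert_at hc hrxR).2.2.1 hrootx
  have hdy0 : d ry.toNat = 0 := (pvCert_at hc hryR).2.2.1 hrooty
  have hneN : rx.toNat ≠ ry.toNat := pvToNat_ne hrxR.1 hryR.1 hne
  have hrtx : pvRt p rx = rx := pvRt_root hc hrxR hrootx
  have hrty : pvRt p ry = ry := pvRt_root hc hryR hrooty
  set q := p.set ry.toNat rx with hq
  have hlen : q.length = p.length := List.length_set ..
  have hgq : ∀ j : Nat, j ≠ ry.toNat → q.getD j 0 = p.getD j 0 := fun j hj =>
    pvGetD_set_ne (fun h => hj h.symm) rx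
  have hgqy : q.getD ry.toNat 0 = rx := pvGetD_set_self hryR.2 rx
  have hNR : pvNR q = pvNR p + 1 := by
    unfold pvNR
    rw [hlen]
    apply pvCountP_flip (fun i => decide (p.getD i 0 ≠ (i : Int)))
      (fun i => decide (q.getD i 0 ≠ (i : Int))) ry.toNat _ (List.nodup_range)
      (List.mem_range.mpr hryR.2)
    · simp only [ne_eq, Int.toNat_of_nonneg hryR.1, hrooty, decide_not]
      simp
    · simp only [ne_eq, hgqy, Int.toNat_of_nonneg hryR.1, decide_not]
      simp [hne]
    · intro j _ hj
      rw [hgq j hj]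
  -- cast helper: pvInR p ↑i and (↑i).toNat = i for i < p.length
  have hInN : ∀ i : Nat, i < p.length → pvInR p (i : Int) := by
    intro i hi
    exact ⟨Int.natCast_nonneg i, by simpa using hi⟩
  have hcq : pvCert q (fun i => if pvRt p (i : Int) = ry then d i + 1 else d i) := by
    intro i hi
    rw [hlen] at hi
    by_cases hiy : i = ry.toNat
    · subst hiy
      simp only [hlen, hNR, hgqy, Int.toNat_of_nonneg hryR.1]
      refine ⟨hrxR.1, hrxR.2, ?_, ?_, ?_⟩
      · intro h
        exact absurd h hne
      · intro _
        simp only [hgqy, Int.toNat_of_nonneg hrxR.1, Int.toNat_of_nonneg hryR.1,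
          hrtx, hrty, if_neg hne, if_pos rfl, if_true]
        omega
      · simp only [hgqy, Int.toNat_of_nonneg hryR.1, hrty, if_pos rfl, if_true]
        omega
    · have hgqi := hgq i hiy
      have hci := hc i hi
      have hiInt : ((i : Int)).toNat = i := Int.toNat_natCast i
      have hiny : (i : Int) ≠ ry := by
        intro h
        apply hiy
        rw [← hiInt, h]
      simp only [hlen, hNR, hgqi]
      refine ⟨hci.1, hci.2.1, ?_, ?_, ?_⟩
      · intro h
        have hroot : pvRt p (i : Int) = (i : Int) := pvRt_root hc (hInN i hi) (by rw [hiInt]; exact h)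
        rw [hroot, if_neg hiny]
        exact hci.2.2.1 h
      · intro h
        have hstep : pvRt p (i : Int) = pvRt p (p.getD i 0) := by
          have := pvRt_step hc (hInN i hi) (by rw [hiInt]; exact h)
          rwa [hiInt] at this
        have hv0 : 0 ≤ p.getD i 0 := hci.1
        have hvInt : (((p.getD i 0).toNat : Nat) : Int) = p.getD i 0 := Int.toNat_of_nonneg hv0
        rw [hvInt, ← hstep]
        by_cases hcond : pvRt p (i : Int) = ry
        · simp only [if_pos hcond]
          have := hci.2.2.2.1 h
          omega
        · simp only [if_neg hcond]
          exact hci.2.2.2.1 h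
      · by_cases hcond : pvRt p (i : Int) = ry
        · simp only [if_pos hcond]
          have := hci.2.2.2.2
          omega
        · simp only [if_neg hcond]
          have := hci.2.2.2.2
          omega
  refine ⟨hcq, ?_⟩
  have hInRq : ∀ z, pvInR p z → pvInR q z := fun z hz => ⟨hz.1, by rw [hlen]; exact hz.2⟩
  have hrootxq : q.getD rx.toNat 0 = rx := by rw [hgq _ hneN]; exact hrootx
  intro z hz
  obtain ⟨k, hk⟩ : ∃ k, d z.toNat ≤ k := ⟨_, le_refl _⟩
  induction k generalizing z with
  | zero =>
    by_cases hr' : p.getD z.toNat 0 = z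
    · by_cases hzy : z.toNat = ry.toNat
      · have hzI : z = ry := by have := hz.1; have := hryR.1; omega
        subst hzI
        rw [pvRt_step hcq (hInRq z hz) (by rw [hgqy]; exact hne), hgqy,
          pvRt_root hcq (hInRq rx hrxR) hrootxq, hrty, if_pos rfl]
      · have hzny : z ≠ ry := by intro h; exact hzy (by rw [h])
        rw [pvRt_root hcq (hInRq z hz) (by rw [hgq _ hzy]; exact hr'),
          pvRt_root hc hz hr', if_neg hzny]
    · have := (pvCert_at hc hz).2.2.2.1 hr'
      omega
  | succ k ih =>
    by_cases hr' : p.getD z.toNat 0 = z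
    · by_cases hzy : z.toNat = ry.toNat
      · have hzI : z = ry := by have := hz.1; have := hryR.1; omega
        subst hzI
        rw [pvRt_step hcq (hInRq z hz) (by rw [hgqy]; exact hne), hgqy,
          pvRt_root hcq (hInRq rx hrxR) hrootxq, hrty, if_pos rfl]
      · have hzny : z ≠ ry := by intro h; exact hzy (by rw [h])
        rw [pvRt_root hcq (hInRq z hz) (by rw [hgq _ hzy]; exact hr'),
          pvRt_root hc hz hr', if_neg hzny]
    · have hzy : z.toNat ≠ ry.toNat := by
        intro h
        have hzI : z = ry := by have := hz.1; have := hryR.1; omega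
        rw [hzI] at hr'
        exact hr' hrooty
      rw [pvRt_step hcq (hInRq z hz) (by rw [hgq _ hzy]; exact hr'), hgq _ hzy,
        pvRt_step hc hz hr']
      exact ih _ (pvInR_step hc hz) (by have := (pvCert_at hc hz).2.2.2.1 hr'; omega)

theorem pvFindA_succ {p : List Int} {x : Int} (hx : pvInR p x) (fuel : Nat) :
    pvFindA (fuel+1) p x =
      if p.getD x.toNat 0 = x then (p, x)
      else (PySem.List.pySetD (pvFindA fuel p (p.getD x.toNat 0)).1 x
              (pvFindA fuel p (p.getD x.toNat 0)).2,
            (pvFindA fuel p (p.getD x.toNat 0)).2) := by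
  simp only [pvFindA, pvGet_eq hx, ne_eq, ite_not]

theorem pvFindA_spec {p : List Int} {d : Nat → Nat} (hc : pvCert p d) :
    ∀ (fuel : Nat) (x : Int), pvInR p x → d x.toNat < fuel →
      (pvFindA fuel p x).2 = pvRt p x ∧
      (pvFindA fuel p x).1.length = p.length ∧
      pvCert (pvFindA fuel p x).1 d ∧
      pvNR (pvFindA fuel p x).1 = pvNR p ∧
      (∀ y : Int, pvInR p y → pvRt (pvFindA fuel p x).1 y = pvRt p y) ∧
      (∀ j : Nat, j < p.length → d x.toNat < d j → (pvFindA fuel p x).1.getD j 0 = p.getD j 0) := by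
  intro fuel
  induction fuel with
  | zero => intro x hx hf; omega
  | succ f ih =>
    intro x hx hf
    rw [pvFindA_succ hx f]
    by_cases hr : p.getD x.toNat 0 = x
    · rw [if_pos hr]
      exact ⟨(pvRt_root hc hx hr).symm, rfl, hc, rfl, fun y _ => rfl, fun j _ _ => rfl⟩
    · rw [if_neg hr]
      have hdpx := (pvCert_at hc hx).2.2.2.1 hr
      obtain ⟨hR, hLen, hCert, hNR1, hRt, hAgree⟩ :=
        ih (p.getD x.toNat 0) (pvInR_step hc hx) (by omega)
      set P1 := (pvFindA f p (p.getD x.toNat 0)).1 with hP1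
      set R := (pvFindA f p (p.getD x.toNat 0)).2 with hRdef
      have hxP1 : pvInR P1 x := ⟨hx.1, by rw [hLen]; exact hx.2⟩
      have hgx : P1.getD x.toNat 0 = p.getD x.toNat 0 := hAgree x.toNat hx.2 hdpx
      have hnrx : P1.getD x.toNat 0 ≠ x := by rw [hgx]; exact hr
      have hRval : R = pvRt p x := by rw [hR, pvRt_step hc hx hr]
      have hRP1 : R = pvRt P1 x := by rw [hRval, hRt x hx]
      have hset : PySem.List.pySetD P1 x R = P1.set x.toNat (pvRt P1 x) := by
        rw [PySem.List.pySetD_of_nonneg P1 R hx.1, hRP1]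
      obtain ⟨hCert2, hNR2, hRt2⟩ := pvCompress hCert hxP1 hnrx
      refine ⟨hRval, ?_, ?_, ?_, ?_, ?_⟩
      · simp only [hset, List.length_set]
        exact hLen
      · rw [hset]; exact hCert2
      · rw [hset, hNR2]; exact hNR1
      · intro y hy
        have hyP1 : pvInR P1 y := ⟨hy.1, by rw [hLen]; exact hy.2⟩
        rw [hset, hRt2 y hyP1]
        exact hRt y hy
      · intro j hj hdj
        have hjx : x.toNat ≠ j := by intro h; rw [h] at hdj; omega
        rw [hset, pvGetD_set_ne hjx]
        exact hAgree j hj (by omega)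

-- find on a possibly NEGATIVE Python index: one wraparound read, then the nonnegative case
theorem pvFindA_full (L : Nat) {p : List Int} {d : Nat → Nat} (hc : pvCert p d)
    (hp : p.length = L) {x : Int} (hx1 : -(L:Int) ≤ x) (hx2 : x < (L:Int)) :
    (pvFindA (L + 1) p x).2 = pvRt p (pvNm L x) ∧
    (pvFindA (L + 1) p x).1.length = L ∧
    pvCert (pvFindA (L + 1) p x).1 d ∧
    pvNR (pvFindA (L + 1) p x).1 = pvNR p ∧
    (∀ y : Int, pvInR p y → pvRt (pvFindA (L + 1) p x).1 y = pvRt p y) := by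
  subst hp
  by_cases hx0 : 0 ≤ x
  · have hxI : pvInR p x := ⟨hx0, by omega⟩
    obtain ⟨hR, hLen, hCert, hNR, hRt, _⟩ :=
      pvFindA_spec hc (p.length + 1) x hxI (pvCert_fuel hc hxI.2)
    have hnm : pvNm p.length x = x := by unfold pvNm; rw [if_neg (by omega)]
    rw [hnm]
    exact ⟨hR, hLen, hCert, hNR, hRt⟩
  · have hxneg : x < 0 := by omega
    have hL0 : 0 < p.length := by omega
    have hnm : pvNm p.length x = x + p.length := by unfold pvNm; rw [if_pos hxneg]
    rw [hnm]
    have ha'I : pvInR p (x + p.length) := ⟨by omega, by omega⟩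
    set nx := (x + (p.length:Int)).toNat with hnx
    have hnxL : nx < p.length := ha'I.2
    set px := p.getD nx 0 with hpx
    have hpx0 : 0 ≤ px := (hc nx hnxL).1
    have hpxL : px.toNat < p.length := (hc nx hnxL).2.1
    have hpxI : pvInR p px := ⟨hpx0, hpxL⟩
    have hpxne : ¬ px = x := by omega
    have hget : PySem.List.pyGet? p x = some px := pvGet_negI hx1 hxneg
    have hstep : pvFindA (p.length + 1) p x =
        (PySem.List.pySetD (pvFindA p.length p px).1 x (pvFindA p.length p px).2,
         (pvFindA p.length p px).2) := by
      simp only [pvFindA, hget, ne_eq, hpxne, not_false_eq_true, if_pos]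
    by_cases hroot : px = x + p.length
    · -- x+L is its own root: find(px) returns (p, px) and the write is a no-op
      have hrootE : p.getD (x + (p.length:Int)).toNat 0 = x + p.length := by
        rw [← hnx, ← hpx]; exact hroot
      have hrtA : pvRt p (x + p.length) = x + p.length := pvRt_root hc ha'I hrootE
      obtain ⟨k, hk⟩ : ∃ k, p.length = k + 1 := ⟨p.length - 1, by omega⟩
      have hfind : pvFindA p.length p px = (p, px) := by
        rw [hk, pvFindA_succ hpxI k, if_pos (by rw [hroot]; exact hrootE)]
      have hsetE : PySem.List.pySetD p x px = p := by
        rw [pvSet_negI px hx1 hxneg, ← hnx, hpx,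
          List.getD_eq_getElem _ _ hnxL, List.set_getElem_self]
      rw [hstep, hfind, hsetE]
      refine ⟨?_, rfl, hc, rfl, fun y _ => rfl⟩
      rw [hroot]
      exact hrtA.symm
    · -- non-root: recurse on px, then one compression write at index x+L
      have hrootE : p.getD (x + (p.length:Int)).toNat 0 ≠ x + p.length := by
        rw [← hnx, ← hpx]; exact hroot
      have hdnx : d px.toNat < d nx := by
        have := (pvCert_at hc ha'I).2.2.2.1 hrootE
        rwa [← hnx, ← hpx] at this
      have hfuel : d px.toNat < p.length := by
        have h1 := (hc nx hnxL).2.2.2.2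
        have h2 := pvNR_lt hc hL0
        omega
      obtain ⟨hR, hLen, hCert, hNR, hRt, hAgree⟩ := pvFindA_spec hc p.length px hpxI hfuel
      set P1 := (pvFindA p.length p px).1 with hP1
      set r := (pvFindA p.length p px).2 with hr
      have hrval : r = pvRt p (x + p.length) := by
        rw [hR, pvRt_step hc ha'I hrootE, ← hnx, ← hpx]
      have ha'P1 : pvInR P1 (x + p.length) := ⟨by omega, by rw [hLen]; exact hnxL⟩
      have hgP1 : P1.getD nx 0 = px := hAgree nx hnxL hdnx
      have hnrP1 : P1.getD (x + (p.length:Int)).toNat 0 ≠ x + p.length := by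
        rw [← hnx, hgP1]; exact hroot
      have hrP1 : r = pvRt P1 (x + p.length) := by
        rw [hrval, ← hRt _ ha'I]
      have hset : PySem.List.pySetD P1 x r = P1.set (x + (p.length:Int)).toNat (pvRt P1 (x + p.length)) := by
        rw [pvSet_negI r (by rw [hLen]; exact hx1) hxneg, hLen, hrP1]
      obtain ⟨hCert2, hNR2, hRt2⟩ := pvCompress hCert ha'P1 hnrP1
      rw [hstep]
      refine ⟨hrval, ?_, ?_, ?_, ?_⟩
      · simp only [hset, List.length_set]
        exact hLen
      · rw [hset]; exact hCert2
      · rw [hset, hNR2]; exact hNR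
      · intro y hy
        have hyP1 : pvInR P1 y := ⟨hy.1, by rw [hLen]; exact hy.2⟩
        rw [hset, hRt2 y hyP1]
        exact hRt y hy

theorem pvNm_nonneg (L : Nat) {x : Int} (h1 : -(L:Int) ≤ x) : 0 ≤ pvNm L x := by
  unfold pvNm; split <;> omega

theorem pvNm_lt (L : Nat) {x : Int} (h1 : -(L:Int) ≤ x) (h2 : x < (L:Int)) : (pvNm L x).toNat < L := by
  unfold pvNm; split <;> omega

theorem pvRoot_of_d0 {p : List Int} {d : Nat → Nat} (hc : pvCert p d) {x : Int}
    (hx : pvInR p x) (h0 : d x.toNat = 0) : p.getD x.toNat 0 = x := by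
  by_cases hr : p.getD x.toNat 0 = x
  · exact hr
  · have := (pvCert_at hc hx).2.2.2.1 hr
    omega

theorem pvUnionA_spec (L : Nat) {p : List Int} {d : Nat → Nat} (hc : pvCert p d)
    (hp : p.length = L) {x y : Int}
    (hx1 : -(L:Int) ≤ x) (hx2 : x < (L:Int)) (hy1 : -(L:Int) ≤ y) (hy2 : y < (L:Int)) :
    (pvUnionA (L + 1) p x y).1.length = L ∧
    (∃ d', pvCert (pvUnionA (L + 1) p x y).1 d') ∧
    ((pvRt p (pvNm L x) = pvRt p (pvNm L y) ∧
        ∀ z : Int, pvInR p z → pvRt (pvUnionA (L + 1) p x y).1 z = pvRt p z) ∨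
     (pvRt p (pvNm L x) ≠ pvRt p (pvNm L y) ∧
        ∀ z : Int, pvInR p z →
          pvRt (pvUnionA (L + 1) p x y).1 z =
            if pvRt p z = pvRt p (pvNm L y) then pvRt p (pvNm L x) else pvRt p z)) := by
  obtain ⟨hR1, hLen1, hCert1, hNR1, hRt1⟩ := pvFindA_full L hc hp hx1 hx2
  rcases hE1 : pvFindA (L + 1) p x with ⟨p1, rx⟩
  rw [hE1] at hR1 hLen1 hCert1 hNR1 hRt1
  simp only at hR1 hLen1 hCert1 hNR1 hRt1
  have hNmyI : pvInR p (pvNm L y) := ⟨pvNm_nonneg L hy1, by rw [hp]; exact pvNm_lt L hy1 hy2⟩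
  have hNmxI : pvInR p (pvNm L x) := ⟨pvNm_nonneg L hx1, by rw [hp]; exact pvNm_lt L hx1 hx2⟩
  obtain ⟨hR2, hLen2, hCert2, hNR2, hRt2⟩ := pvFindA_full L hCert1 hLen1 hy1 hy2
  rcases hE2 : pvFindA (L + 1) p1 y with ⟨p2, ry⟩
  rw [hE2] at hR2 hLen2 hCert2 hNR2 hRt2
  simp only at hR2 hLen2 hCert2 hNR2 hRt2
  have hrx : rx = pvRt p (pvNm L x) := hR1
  have hry : ry = pvRt p (pvNm L y) := by
    rw [hR2, hRt1 _ hNmyI]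
  have hInR2 : ∀ z, pvInR p z → pvInR p2 z :=
    fun z hz => ⟨hz.1, by rw [hLen2, ← hp]; exact hz.2⟩
  have hRt12 : ∀ z, pvInR p z → pvRt p2 z = pvRt p z := by
    intro z hz
    rw [hRt2 z ⟨hz.1, by rw [hLen1, ← hp]; exact hz.2⟩, hRt1 z hz]
  have hLen12 : p2.length = L := hLen2
  simp only [pvUnionA, hE1, hE2]
  by_cases hne : rx = ry
  · simp only [hne, ne_eq, not_true_eq_false, if_neg, ite_false]
    refine ⟨hLen12, ⟨d, hCert2⟩, Or.inl ⟨by rw [← hrx, ← hry, hne], hRt12⟩⟩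
  · simp only [ne_eq, hne, not_false_eq_true, if_pos, ite_true]
    obtain ⟨hrxR, _, hdrx0⟩ := pvRt_spec hc hNmxI
    obtain ⟨hryR, _, hdry0⟩ := pvRt_spec hc hNmyI
    rw [← hrx] at hrxR hdrx0
    rw [← hry] at hryR hdry0
    have hrxR2 : pvInR p2 rx := hInR2 rx hrxR
    have hryR2 : pvInR p2 ry := hInR2 ry hryR
    have hrootx2 : p2.getD rx.toNat 0 = rx := pvRoot_of_d0 hCert2 hrxR2 hdrx0
    have hrooty2 : p2.getD ry.toNat 0 = ry := pvRoot_of_d0 hCert2 hryR2 hdry0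
    obtain ⟨hCertQ, hRtQ⟩ := pvLink hCert2 hrxR2 hryR2 hrootx2 hrooty2 hne
    have hsetq : PySem.List.pySetD p2 ry rx = p2.set ry.toNat rx :=
      PySem.List.pySetD_of_nonneg p2 rx hryR.1
    refine ⟨?_, ?_, Or.inr ⟨by rw [← hrx, ← hry]; exact hne, ?_⟩⟩
    · simp only [hsetq, List.length_set]
      exact hLen12
    · rw [hsetq]
      exact ⟨_, hCertQ⟩
    · intro z hz
      rw [hsetq, hRtQ z (hInR2 z hz), hRt12 z hz, ← hrx, ← hry]

theorem pvMapGetD {comp : List Int} {i : Nat} (hi : i < comp.length) (f : Int → Int) :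
    (comp.map f).getD i 0 = f (comp.getD i 0) := by
  rw [List.getD_eq_getElem _ _ (by simpa using hi), List.getD_eq_getElem _ _ hi,
    List.getElem_map]

-- comp[a] for a possibly NEGATIVE Python index, as a normalised Nat read
theorem pvGetDU {comp : List Int} {L : Nat} (hcomp : comp.length = L) {a : Int}
    (h1 : -(L:Int) ≤ a) (h2 : a < (L:Int)) :
    PySem.List.pyGetD comp a 0 = comp.getD (pvNm L a).toNat 0 := by
  by_cases h0 : 0 ≤ a
  · rw [PySem.List.pyGetD_eq_getElem comp 0 h0 (by rw [hcomp]; exact h2),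
      List.getD_eq_getElem _ _ (by rw [hcomp]; exact pvNm_lt L h1 h2)]
    congr 1
    unfold pvNm
    rw [if_neg (by omega)]
  · have hneg : a < 0 := by omega
    unfold PySem.List.pyGetD
    rw [pvGet_negI (by rw [hcomp]; exact h1) hneg, Option.getD_some]
    congr 1
    unfold pvNm
    rw [if_pos hneg, hcomp]

theorem pvLoop (L : Nat) :
    ∀ (es : List (List Int)) (p comp : List Int) (red : Int) (d : Nat → Nat),
      (∀ e ∈ es, e.length = 2 ∧ ∀ v ∈ e, -(L:Int) ≤ v ∧ v < (L:Int)) →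
      p.length = L → comp.length = L → pvCert p d →
      (∀ i j : Nat, i < L → j < L →
        (pvRt p (i : Int) = pvRt p (j : Int) ↔ comp.getD i 0 = comp.getD j 0)) →
      (es.foldl (fun (st : List Int × Int) e =>
          match e with
          | [a, b] =>
            match pvUnionA (L + 1) st.1 a b with
            | (p, ok) => (p, if ok then st.2 else st.2 + 1)
          | _ => st) (p, red)).1.length = L ∧
      (es.foldl (fun (comp : List Int) e =>
          match e with
          | [] => comp
          | [_] => comp
          | a :: b :: rest =>
            if rest.isEmpty then
              let ca := PySem.List.pyGetD comp a 0
              let cb := PySem.List.pyGetD comp b 0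
              if ca ≠ cb then comp.map (fun c => if c = cb then ca else c) else comp
            else comp) comp).length = L ∧
      (∃ d', pvCert (es.foldl (fun (st : List Int × Int) e =>
          match e with
          | [a, b] =>
            match pvUnionA (L + 1) st.1 a b with
            | (p, ok) => (p, if ok then st.2 else st.2 + 1)
          | _ => st) (p, red)).1 d') ∧
      (∀ i j : Nat, i < L → j < L →
        (pvRt (es.foldl (fun (st : List Int × Int) e =>
          match e with
          | [a, b] =>
            match pvUnionA (L + 1) st.1 a b with
            | (p, ok) => (p, if ok then st.2 else st.2 + 1)
          | _ => st) (p, red)).1 (i : Int) =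
         pvRt (es.foldl (fun (st : List Int × Int) e =>
          match e with
          | [a, b] =>
            match pvUnionA (L + 1) st.1 a b with
            | (p, ok) => (p, if ok then st.2 else st.2 + 1)
          | _ => st) (p, red)).1 (j : Int) ↔
         (es.foldl (fun (comp : List Int) e =>
          match e with
          | [] => comp
          | [_] => comp
          | a :: b :: rest =>
            if rest.isEmpty then
              let ca := PySem.List.pyGetD comp a 0
              let cb := PySem.List.pyGetD comp b 0
              if ca ≠ cb then comp.map (fun c => if c = cb then ca else c) else comp
            else comp) comp).getD i 0 =
         (es.foldl (fun (comp : List Int) e =>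
          match e with
          | [] => comp
          | [_] => comp
          | a :: b :: rest =>
            if rest.isEmpty then
              let ca := PySem.List.pyGetD comp a 0
              let cb := PySem.List.pyGetD comp b 0
              if ca ≠ cb then comp.map (fun c => if c = cb then ca else c) else comp
            else comp) comp).getD j 0)) := by
  intro es
  induction es with
  | nil =>
    intro p comp red d _ hp hcomp hcert hinv
    exact ⟨hp, hcomp, ⟨d, hcert⟩, hinv⟩
  | cons e es ih =>
    intro p comp red d hes hp hcomp hcert hinv
    obtain ⟨a, b, rfl⟩ := List.length_eq_two.mp (hes e List.mem_cons_self).1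
    obtain ⟨ha1, ha2⟩ := (hes _ List.mem_cons_self).2 a (by simp)
    obtain ⟨hb1, hb2⟩ := (hes _ List.mem_cons_self).2 b (by simp)
    have hrest := fun e' he' => hes e' (List.mem_cons_of_mem _ he')
    set aN := (pvNm L a).toNat with haNdef
    set bN := (pvNm L b).toNat with hbNdef
    have haN : ((aN : Nat) : Int) = pvNm L a := Int.toNat_of_nonneg (pvNm_nonneg L ha1)
    have hbN : ((bN : Nat) : Int) = pvNm L b := Int.toNat_of_nonneg (pvNm_nonneg L hb1)
    have haL : aN < L := pvNm_lt L ha1 ha2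
    have hbL : bN < L := pvNm_lt L hb1 hb2
    have hca : PySem.List.pyGetD comp a 0 = comp.getD aN 0 := pvGetDU hcomp ha1 ha2
    have hcb : PySem.List.pyGetD comp b 0 = comp.getD bN 0 := pvGetDU hcomp hb1 hb2
    have hKey : pvRt p (pvNm L a) = pvRt p (pvNm L b) ↔ comp.getD aN 0 = comp.getD bN 0 := by
      have := hinv aN bN haL hbL
      rwa [haN, hbN] at this
    obtain ⟨hULen, ⟨d', hUCert⟩, hUdisj⟩ := pvUnionA_spec L hcert hp ha1 ha2 hb1 hb2
    rcases hU : pvUnionA (L + 1) p a b with ⟨q, ok⟩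
    rw [hU] at hULen hUCert hUdisj
    simp only at hULen hUCert hUdisj
    simp only [List.foldl_cons, hU]
    by_cases hcc : comp.getD aN 0 = comp.getD bN 0
    · -- labels equal: neither side changes the partition
      have hrt : pvRt p (pvNm L a) = pvRt p (pvNm L b) := hKey.mpr hcc
      have hpres : ∀ z : Int, pvInR p z → pvRt q z = pvRt p z := by
        rcases hUdisj with ⟨_, h⟩ | ⟨hne, _⟩
        · exact h
        · exact absurd hrt hne
      have hBval : (if PySem.List.pyGetD comp a 0 ≠ PySem.List.pyGetD comp b 0 then
          comp.map (fun c => if c = PySem.List.pyGetD comp b 0 then PySem.List.pyGetD comp a 0 else c)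
          else comp) = comp := by
        rw [hca, hcb, if_neg (not_not_intro hcc)]
      simp only [hBval]
      apply ih q comp _ d' hrest hULen hcomp hUCert
      intro i j hi hj
      have hiI : pvInR p (i : Int) := ⟨Int.natCast_nonneg i, by simpa [hp] using hi⟩
      have hjI : pvInR p (j : Int) := ⟨Int.natCast_nonneg j, by simpa [hp] using hj⟩
      rw [hpres _ hiI, hpres _ hjI]
      exact hinv i j hi hj
    · -- labels differ: A links the roots, B relabels cb-labelled nodes to ca
      have hrt : pvRt p (pvNm L a) ≠ pvRt p (pvNm L b) := fun h => hcc (hKey.mp h)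
      have htrans : ∀ z : Int, pvInR p z →
          pvRt q z = if pvRt p z = pvRt p (pvNm L b) then pvRt p (pvNm L a) else pvRt p z := by
        rcases hUdisj with ⟨heq, _⟩ | ⟨_, h⟩
        · exact absurd heq hrt
        · exact h
      have hBval : (if PySem.List.pyGetD comp a 0 ≠ PySem.List.pyGetD comp b 0 then
          comp.map (fun c => if c = PySem.List.pyGetD comp b 0 then PySem.List.pyGetD comp a 0 else c)
          else comp) = comp.map (fun c => if c = comp.getD bN 0 then comp.getD aN 0 else c) := by
        rw [hca, hcb, if_pos hcc]
      simp only [hBval]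
      set comp' := comp.map (fun c => if c = comp.getD bN 0 then comp.getD aN 0 else c) with hcomp'
      have hcomp'len : comp'.length = L := by rw [hcomp', List.length_map, hcomp]
      apply ih q comp' _ d' hrest hULen hcomp'len hUCert
      intro i j hi hj
      have hiI : pvInR p (i : Int) := ⟨Int.natCast_nonneg i, by simpa [hp] using hi⟩
      have hjI : pvInR p (j : Int) := ⟨Int.natCast_nonneg j, by simpa [hp] using hj⟩
      have hgi : comp'.getD i 0 =
          if comp.getD i 0 = comp.getD bN 0 then comp.getD aN 0 else comp.getD i 0 :=
        pvMapGetD (by rw [hcomp]; exact hi) _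
      have hgj : comp'.getD j 0 =
          if comp.getD j 0 = comp.getD bN 0 then comp.getD aN 0 else comp.getD j 0 :=
        pvMapGetD (by rw [hcomp]; exact hj) _
      rw [htrans _ hiI, htrans _ hjI, hgi, hgj]
      have hib : pvRt p (i : Int) = pvRt p (pvNm L b) ↔ comp.getD i 0 = comp.getD bN 0 := by
        have := hinv i bN hi hbL; rwa [hbN] at this
      have hjb : pvRt p (j : Int) = pvRt p (pvNm L b) ↔ comp.getD j 0 = comp.getD bN 0 := by
        have := hinv j bN hj hbL; rwa [hbN] at this
      have hia : pvRt p (i : Int) = pvRt p (pvNm L a) ↔ comp.getD i 0 = comp.getD aN 0 := by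
        have := hinv i aN hi haL; rwa [haN] at this
      have hja : pvRt p (j : Int) = pvRt p (pvNm L a) ↔ comp.getD j 0 = comp.getD aN 0 := by
        have := hinv j aN hj haL; rwa [haN] at this
      by_cases h1 : pvRt p (i : Int) = pvRt p (pvNm L b) <;>
        by_cases h2 : pvRt p (j : Int) = pvRt p (pvNm L b)
      · rw [if_pos h1, if_pos h2, if_pos (hib.mp h1), if_pos (hjb.mp h2)]
        exact iff_of_true rfl rfl
      · rw [if_pos h1, if_neg h2, if_pos (hib.mp h1), if_neg (fun h => h2 (hjb.mpr h))]
        constructor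
        · intro h; exact (hja.mp h.symm).symm
        · intro h; exact (hja.mpr h.symm).symm
      · rw [if_neg h1, if_pos h2, if_neg (fun h => h1 (hib.mpr h)), if_pos (hjb.mp h2)]
        constructor
        · intro h; exact hia.mp h
        · intro h; exact hia.mpr h
      · rw [if_neg h1, if_neg h2, if_neg (fun h => h1 (hib.mpr h)),
          if_neg (fun h => h2 (hjb.mpr h))]
        exact hinv i j hi hj

theorem pvFinLoop (L : Nat) :
    ∀ (idxs : List Int) (p : List Int) (acc : List Int) (d : Nat → Nat),
      p.length = L → pvCert p d → (∀ i ∈ idxs, pvInR p i) →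
      (idxs.foldl (fun (st : List Int × List Int) i =>
          match pvFindA (L + 1) st.1 i with
          | (p, r) => (p, st.2 ++ [r])) (p, acc)).2 = acc ++ idxs.map (pvRt p) := by
  intro idxs
  induction idxs with
  | nil => intro p acc d _ _ _; simp
  | cons i idxs ih =>
    intro p acc d hp hcert hmem
    have hiI : pvInR p i := hmem i List.mem_cons_self
    obtain ⟨hR, hLen, hCert, _, hRt, _⟩ :=
      pvFindA_spec hcert (L + 1) i hiI (by rw [← hp]; exact pvCert_fuel hcert hiI.2)
    rcases hF : pvFindA (L + 1) p i with ⟨p1, r⟩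
    rw [hF] at hR hLen hCert hRt
    simp only at hR hLen hCert hRt
    simp only [List.foldl_cons, hF]
    rw [ih p1 (acc ++ [r]) d (by rw [hLen, hp]) hCert
      (fun z hz => ⟨(hmem z (List.mem_cons_of_mem _ hz)).1,
        by rw [hLen]; exact (hmem z (List.mem_cons_of_mem _ hz)).2⟩)]
    rw [List.map_cons, hR]
    have hmapeq : idxs.map (pvRt p1) = idxs.map (pvRt p) :=
      List.map_congr_left (fun z hz => hRt z (hmem z (List.mem_cons_of_mem _ hz)))
    rw [hmapeq]
    simp

theorem pvCountEq (f g : Nat → Int) :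
    ∀ (l : List Nat), (∀ i ∈ l, ∀ j ∈ l, (f i = f j ↔ g i = g j)) →
      (PySem.Set.ofList (l.map f)).length = (PySem.Set.ofList (l.map g)).length := by
  intro l
  induction l using List.reverseRecOn with
  | nil => simp
  | append_singleton l x ih =>
    intro h
    have hl := fun i hi j hj => h i (List.mem_append_left _ hi) j (List.mem_append_left _ hj)
    have hx : f x ∈ l.map f ↔ g x ∈ l.map g := by
      simp only [List.mem_map]
      constructor
      · rintro ⟨i, hi, hfi⟩
        exact ⟨i, hi, (h i (List.mem_append_left _ hi) x (by simp)).mp hfi⟩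
      · rintro ⟨i, hi, hgi⟩
        exact ⟨i, hi, (h i (List.mem_append_left _ hi) x (by simp)).mpr hgi⟩
    rw [List.map_append, List.map_append, List.map_singleton, List.map_singleton,
      PySem.Set.ofList_append_singleton, PySem.Set.ofList_append_singleton,
      PySem.Set.add_eq_ite, PySem.Set.add_eq_ite]
    have hmemf : f x ∈ PySem.Set.ofList (l.map f) ↔ g x ∈ PySem.Set.ofList (l.map g) := by
      rw [PySem.Set.mem_ofList, PySem.Set.mem_ofList]
      exact hx
    by_cases hin : f x ∈ PySem.Set.ofList (l.map f)
    · rw [if_pos hin, if_pos (hmemf.mp hin)]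
      exact ih hl
    · rw [if_neg hin, if_neg (fun hh => hin (hmemf.mpr hh))]
      simp only [List.length_append, List.length_cons, List.length_nil]
      rw [ih hl]

theorem pvSelfMap (xs : List Int) : xs = (List.range xs.length).map (fun i => xs.getD i 0) := by
  apply List.ext_getElem
  · simp
  · intro i h1 h2
    simp only [List.getElem_map, List.getElem_range]
    rw [List.getD_eq_getElem _ _ h1]

theorem makeConnected_spec_main (n : Int) (connections : List (List Int))
    (hpre0 : Pre_makeConnected_approach4_mathematical_analysis n connections) :
    makeConnected_approach4_mathematical_analysis n connections =
      makeConnected_approach4_mathematical_analysis_alt n connections := by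
  unfold makeConnected_approach4_mathematical_analysis
    makeConnected_approach4_mathematical_analysis_alt
  by_cases hguard : (connections.length : Int) < n - 1
  · rw [if_pos hguard, if_pos hguard]
  · have hpre : ∀ e ∈ connections, e.length = 2 ∧ ∀ v ∈ e, -n ≤ v ∧ v < n := by
      rcases hpre0 with h | h
      · exact absurd h hguard
      · exact h
    rw [if_neg hguard, if_neg hguard]
    dsimp only []
    set L := (PySem.List.pyRange 0 n 1).length with hLdef
    have hL : L = n.toNat := by rw [hLdef, PySem.List.length_pyRange_one]; omega
    have hget0 : ∀ i : Nat, i < L → (PySem.List.pyRange 0 n 1).getD i 0 = (i : Int) := by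
      intro i hi
      rw [List.getD_eq_getElem _ _ hi, PySem.List.getElem_pyRange_one]
      omega
    have hcert0 : pvCert (PySem.List.pyRange 0 n 1) (fun _ => 0) := by
      intro i hi
      rw [hget0 i hi]
      refine ⟨Int.natCast_nonneg i, by rw [Int.toNat_natCast]; exact hi, fun _ => rfl, fun h => absurd rfl h, ?_⟩
      exact Nat.zero_le _
    have hInR0 : ∀ i : Nat, i < L → pvInR (PySem.List.pyRange 0 n 1) (i : Int) := by
      intro i hi
      exact ⟨Int.natCast_nonneg i, by rw [Int.toNat_natCast]; exact hi⟩
    have hrt0 : ∀ i : Nat, i < L → pvRt (PySem.List.pyRange 0 n 1) (i : Int) = (i : Int) := by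
      intro i hi
      exact pvRt_root hcert0 (hInR0 i hi) (by rw [Int.toNat_natCast]; exact hget0 i hi)
    have hinv0 : ∀ i j : Nat, i < L → j < L →
        (pvRt (PySem.List.pyRange 0 n 1) (i : Int) = pvRt (PySem.List.pyRange 0 n 1) (j : Int) ↔
         (PySem.List.pyRange 0 n 1).getD i 0 = (PySem.List.pyRange 0 n 1).getD j 0) := by
      intro i j hi hj
      rw [hrt0 i hi, hrt0 j hj, hget0 i hi, hget0 j hj]
    have hedges : ∀ e ∈ connections, e.length = 2 ∧ ∀ v ∈ e, -(L:Int) ≤ v ∧ v < (L:Int) := by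
      intro e he
      refine ⟨(hpre e he).1, fun v hv => ?_⟩
      have hb := (hpre e he).2 v hv
      constructor <;> omega
    obtain ⟨hPlen, hClen, ⟨dF, hCertF⟩, hinvF⟩ :=
      pvLoop L connections (PySem.List.pyRange 0 n 1) (PySem.List.pyRange 0 n 1) 0
        (fun _ => 0) hedges rfl rfl hcert0 hinv0
    have hfin := pvFinLoop L (PySem.List.pyRange 0 n 1) _ [] dF hPlen hCertF
      (by
        intro i hi
        have := PySem.List.mem_pyRange_one.mp hi
        exact ⟨this.1, by rw [hPlen]; omega⟩)
    rw [hfin]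
    simp only [List.nil_append]
    have hrange : PySem.List.pyRange 0 n 1 = (List.range L).map (fun k : Nat => (k : Int)) := by
      rw [PySem.List.pyRange_one 0 n]
      have h1 : (n - 0).toNat = L := by omega
      rw [h1]
      simp
    set P := (connections.foldl (fun (st : List Int × Int) e =>
      match e with
      | [a, b] =>
        match pvUnionA (L + 1) st.1 a b with
        | (p, ok) => (p, if ok then st.2 else st.2 + 1)
      | _ => st) (PySem.List.pyRange 0 n 1, 0)).1 with hPdef
    set CF := connections.foldl (fun (comp : List Int) e =>
      match e with
      | [] => comp
      | [_] => comp
      | a :: b :: rest =>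
        if rest.isEmpty then
          let ca := PySem.List.pyGetD comp a 0
          let cb := PySem.List.pyGetD comp b 0
          if ca ≠ cb then comp.map (fun c => if c = cb then ca else c) else comp
        else comp) (PySem.List.pyRange 0 n 1) with hCFdef
    suffices hlen : (PySem.Set.ofList ((PySem.List.pyRange 0 n 1).map (pvRt P))).length =
        (PySem.Set.ofList CF).length by
      rw [hlen]
    have e1 : (PySem.List.pyRange 0 n 1).map (pvRt P) =
        (List.range L).map (fun k : Nat => pvRt P (k : Int)) := by
      rw [hrange, List.map_map]
      rfl
    have e2 : CF = (List.range L).map (fun k : Nat => CF.getD k 0) := by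
      have := pvSelfMap CF
      rwa [hClen] at this
    rw [e1]
    conv_rhs => rw [e2]
    exact pvCountEq _ _ (List.range L) (by
      intro i hi j hj
      exact hinvF i j (List.mem_range.mp hi) (List.mem_range.mp hj))

-- ===== VERDICT (by name: the statement is the Claim_ definition above) =====
theorem makeConnected_approach4_mathematical_analysis_spec : Claim_equal_makeConnected_approach4_mathematical_analysis := by
  intro n connections _hdom hpre
  unfold Spec_makeConnected_approach4_mathematical_analysis
  exact makeConnected_spec_main n connections hpre
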